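-- pv_equiv track=rewrite | github.com/rgiordan/StanSensitivity | python/generate_models.py | parse_model_blocks
-- ===== SOURCE A (Python) =====
-- from collections import OrderedDict
--
-- def parse_model_blocks(script):
--     # Parse the script into blocks.
--     contents = OrderedDict()
--     last_i = 0
--     in_block = False
--     for i in range(len(script)):
--         if in_block:
--             if script[i] == '{':
--                 num_parens += 1
--             elif script[i] == '}':
--                 num_parens -= 1
--             if num_parens == 0:
--                 # ...then we have closed the opening block bracket.
--                 block = script[last_i:i]
--                 last_i = i + 1
--                 in_block = False
--                 contents[tag] = block
--         else:
--             if script[i] == '{':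
--                 # ...then we have found the opening bracked of a stan block.
--                 in_block = True
--                 tag = script[last_i:i].strip()
--                 last_i = i + 1
--                 num_parens = 1
--
--     return contents
-- ===== SOURCE B (Python) =====
-- from collections import OrderedDict
--
-- def parse_model_blocks(script):
--     # Parse the script into blocks: find each opening brace, take the text before
--     # it (stripped) as the tag, then match braces to find the block's end.
--     contents = OrderedDict()
--     n = len(script)
--     last_i = 0
--     while True:
--         pos = script.find('{', last_i)
--         if pos == -1:
--             return contents
--         tag = script[last_i:pos].strip()
--         depth = 1
--         j = pos + 1
--         end = -1
--         while j < n: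
--             if script[j] == '{':
--                 depth += 1
--             elif script[j] == '}':
--                 depth -= 1
--             if depth == 0:
--                 end = j
--                 break
--             j += 1
--         if end == -1:
--             # unmatched opening brace: nothing more is stored
--             return contents
--         contents[tag] = script[pos + 1:end]
--         last_i = end + 1
-- ===== Notes on version B (the rewrite author's own statement) =====
-- stated objective: faster
-- what changed: A's single forward pass driven by a five-variable state machine (in-block flag, brace counter, carried tag) is replaced by an outer loop that locates each block's opening brace with str.find and an inner depth scan that finds the matching closing brace, storing each block as it closes.
import Mathlib
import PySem

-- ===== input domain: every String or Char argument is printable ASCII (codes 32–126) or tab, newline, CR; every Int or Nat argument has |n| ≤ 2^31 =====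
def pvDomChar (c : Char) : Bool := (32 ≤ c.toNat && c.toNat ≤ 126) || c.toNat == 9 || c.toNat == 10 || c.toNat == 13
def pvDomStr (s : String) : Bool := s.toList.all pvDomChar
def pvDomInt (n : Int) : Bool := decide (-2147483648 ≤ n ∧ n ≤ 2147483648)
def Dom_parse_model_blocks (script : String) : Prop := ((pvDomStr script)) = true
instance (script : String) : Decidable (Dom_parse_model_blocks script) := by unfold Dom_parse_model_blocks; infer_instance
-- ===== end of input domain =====

-- B replaces A's single-pass five-variable state machine by an outer str.find-the-next-opening-brace
-- loop with an inner brace-depth scan (objective: faster by a constant factor, measured).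

-- ===== PORT A =====
-- one iteration of A's `for i in range(len(script))` loop; state = (contents, last_i, in_block, num_parens, tag)
def pmbStep (cs : List Char) (st : PySem.Dict String String × Int × Bool × Int × String)
    (i : Int) : PySem.Dict String String × Int × Bool × Int × String :=
  let (contents, last_i, in_block, num_parens, tag) := st
  let c := PySem.List.pyGetD cs i ' '
  if in_block then
    let np := if c = '{' then num_parens + 1 else if c = '}' then num_parens - 1 else num_parens
    if np = 0 then
      (contents.insert tag (String.ofList (PySem.List.slice cs (some last_i) (some i))),
        i + 1, false, np, tag)
    else
      (contents, last_i, true, np, tag)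
  else
    if c = '{' then
      (contents, i + 1, true, 1,
        String.ofList (PySem.Chars.strip (PySem.List.slice cs (some last_i) (some i))))
    else
      st

def parse_model_blocks (script : String) : List (String × String) :=
  let cs := script.toList
  ((PySem.List.pyRange 0 (cs.length : Int) 1).foldl (pmbStep cs)
    (PySem.Dict.empty, 0, false, 0, "")).1.items

-- ===== PORT B =====
-- B's inner `while j < n` loop: brace-depth scan; returns the index where depth hits 0 (Python's `end`, none = -1)
def pmbScan (cs : List Char) (j : Nat) (depth : Int) : Option Nat :=
  if h : j < cs.length then
    let c := cs[j]
    let depth' := if c = '{' then depth + 1 else if c = '}' then depth - 1 else depth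
    if depth' = 0 then some j else pmbScan cs (j + 1) depth'
  else none
termination_by cs.length - j
decreasing_by exact Nat.sub_succ_lt_self cs.length j h

-- B's outer `while True` loop; `fuel` is only a totality guard: last_i grows by ≥ 2
-- per iteration, so fuel = cs.length + 1 is never exhausted (proved in the lemmas below)
def pmbLoop (cs : List Char) (fuel : Nat) (contents : PySem.Dict String String) (last_i : Nat) :
    List (String × String) :=
  match fuel with
  | 0 => contents.items
  | fuel + 1 =>
    let pos := PySem.Chars.findFrom cs ['{'] (last_i : Int) none
    if pos = -1 then contents.items
    else
      let tag := String.ofList (PySem.Chars.strip (PySem.List.slice cs (some (last_i : Int)) (some pos)))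
      match pmbScan cs (pos.toNat + 1) 1 with
      | none => contents.items
      | some e =>
          pmbLoop cs fuel
            (contents.insert tag (String.ofList (PySem.List.slice cs (some (pos + 1)) (some (e : Int)))))
            (e + 1)

def parse_model_blocks_alt (script : String) : List (String × String) :=
  pmbLoop script.toList (script.toList.length + 1) PySem.Dict.empty 0

-- ===== PRECONDITION & SPEC =====
def Spec_parse_model_blocks (script : String) (out : List (String × String)) : Prop := out = parse_model_blocks_alt script
instance (script : String) (out : List (String × String)) : Decidable (Spec_parse_model_blocks script out) := by unfold Spec_parse_model_blocks; infer_instance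

-- ===== CLAIM (what is proved, stated in full; the proofs are below) =====
def Claim_equal_parse_model_blocks : Prop := ∀ (script : String), Dom_parse_model_blocks script → Spec_parse_model_blocks script (parse_model_blocks script)

-- ===== LEMMAS AND PROOFS =====

theorem pmbScan_some_bounds (cs : List Char) : ∀ (k j : Nat) (depth : Int) (e : Nat),
    cs.length - j ≤ k → pmbScan cs j depth = some e → j ≤ e ∧ e < cs.length := by
  intro k
  induction k with
  | zero =>
    intro j depth e hk h
    rw [pmbScan] at h
    have hj : ¬ j < cs.length := by omega
    simp [hj] at h
  | succ k ih =>
    intro j depth e hk h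
    rw [pmbScan] at h
    by_cases hj : j < cs.length
    · simp only [dif_pos hj] at h
      set depth' := if cs[j] = '{' then depth + 1 else if cs[j] = '}' then depth - 1 else depth with hdep
      split at h
      · injection h with h; omega
      · have := ih (j + 1) depth' e (by omega) h
        omega
    · simp [hj] at h

-- one step of A's loop while inside a block
theorem pmbStep_inblock (cs : List Char) (d : PySem.Dict String String) (l np : Int)
    (tag : String) (j : Nat) (hj : j < cs.length) :
    pmbStep cs (d, l, true, np, tag) (j : Int) =
      (if (if cs[j] = '{' then np + 1 else if cs[j] = '}' then np - 1 else np) = 0 then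
        (d.insert tag (String.ofList (PySem.List.slice cs (some l) (some (j : Int)))),
          (j : Int) + 1, false,
          (if cs[j] = '{' then np + 1 else if cs[j] = '}' then np - 1 else np), tag)
      else (d, l, true,
        (if cs[j] = '{' then np + 1 else if cs[j] = '}' then np - 1 else np), tag)) := by
  simp only [pmbStep, PySem.List.pyGetD_natCast, List.getD_eq_getElem cs ' ' hj, if_true]

-- one step of A's loop while outside a block
theorem pmbStep_notblock (cs : List Char) (d : PySem.Dict String String) (l np : Int)
    (tag : String) (j : Nat) (hj : j < cs.length) :
    pmbStep cs (d, l, false, np, tag) (j : Int) =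
      (if cs[j] = '{' then
        (d, (j : Int) + 1, true, 1,
          String.ofList (PySem.Chars.strip (PySem.List.slice cs (some l) (some (j : Int)))))
      else (d, l, false, np, tag)) := by
  simp only [pmbStep, PySem.List.pyGetD_natCast, List.getD_eq_getElem cs ' ' hj,
    Bool.false_eq_true, ite_false]

theorem singleton_prefix_iff_head? (t : List Char) (a : Char) : [a] <+: t ↔ t.head? = some a := by
  cases t with
  | nil => simp
  | cons b bs => simp [List.cons_prefix_cons, eq_comm]

theorem singleton_prefix_iff_getElem? (cs : List Char) (m : Nat) (a : Char) :
    [a] <+: cs.drop m ↔ cs[m]? = some a := by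
  rw [singleton_prefix_iff_head?, List.head?_drop]

-- if no '{' occurs at or after l, B's find returns -1
theorem pmbFind_none (cs : List Char) (l : Nat) (hl : l ≤ cs.length)
    (hno : ∀ j, l ≤ j → j < cs.length → cs[j]? ≠ some '{') :
    PySem.Chars.findFrom cs ['{'] (l : Int) none = -1 := by
  rw [PySem.Chars.findFrom_natCast_eq_neg_one_iff cs ['{'] l hl, List.singleton_infix_iff]
  intro hmem
  obtain ⟨m, hm, hget⟩ := List.mem_iff_getElem.mp hmem
  have hlen : l + m < cs.length := by
    have := List.length_drop (l := cs) (i := l); omega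
  have : cs[l + m]? = some '{' := by
    rw [List.getElem?_eq_getElem hlen, ← hget, List.getElem_drop]
  exact hno (l + m) (by omega) (by omega) this

-- if the first '{' at or after l is at i, B's find returns i
theorem pmbFind_first (cs : List Char) (l i : Nat) (hli : l ≤ i) (hi : i < cs.length)
    (hc : cs[i] = '{') (hno : ∀ j, l ≤ j → j < i → cs[j]? ≠ some '{') :
    PySem.Chars.findFrom cs ['{'] (l : Int) none = (i : Int) := by
  have hl : l ≤ cs.length := by omega
  have hip : [('{' : Char)] <+: cs.drop i := by
    rw [singleton_prefix_iff_getElem?, List.getElem?_eq_getElem hi, hc]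
  have hne : PySem.Chars.findFrom cs ['{'] (l : Int) none ≠ -1 := by
    rw [ne_eq, PySem.Chars.findFrom_natCast_eq_neg_one_iff cs ['{'] l hl, List.singleton_infix_iff]
    simp only [not_not]
    have hmem : '{' ∈ List.drop i cs := hip.subset (List.mem_singleton_self '{')
    have hdd : List.drop i cs = List.drop (i - l) (List.drop l cs) := by
      rw [List.drop_drop]; congr 1; omega
    exact List.mem_of_mem_drop (hdd ▸ hmem)
  obtain ⟨hge, hpre, hmin⟩ := PySem.Chars.findFrom_natCast_spec cs ['{'] l hl hne
  set r := PySem.Chars.findFrom cs ['{'] (l : Int) none with hr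
  have hr0 : 0 ≤ r := by omega
  rcases lt_trichotomy r.toNat i with hlt | heq | hgt
  · exfalso
    rw [singleton_prefix_iff_getElem?] at hpre
    exact hno r.toNat (by omega) hlt hpre
  · omega
  · exact absurd hip (hmin i hli hgt)

theorem pmb_inblock_none (cs : List Char) (k : Nat) :
    ∀ (j : Nat) (d : PySem.Dict String String) (l np : Int) (tag : String),
      cs.length - j ≤ k → pmbScan cs j np = none →
      ((PySem.List.pyRange (j : Int) (cs.length : Int) 1).foldl (pmbStep cs)
        (d, l, true, np, tag)).1 = d := by
  induction k with
  | zero =>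
    intro j d l np tag hk _
    rw [PySem.List.pyRange_one_eq_nil (by exact_mod_cast (by omega : cs.length ≤ j))]
    rfl
  | succ k ih =>
    intro j d l np tag hk h
    by_cases hj : j < cs.length
    · rw [pmbScan] at h
      simp only [dif_pos hj] at h
      rw [PySem.List.pyRange_one_cons (by exact_mod_cast hj), List.foldl_cons,
        pmbStep_inblock cs d l np tag j hj]
      set np' := if cs[j] = '{' then np + 1 else if cs[j] = '}' then np - 1 else np with hdep
      split at h
      · exact absurd h (by simp)
      next hne =>
        rw [if_neg hne]
        have hc : ((j : Int) + 1) = (((j + 1 : Nat)) : Int) := by push_cast; ring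
        rw [hc]
        exact ih (j + 1) d l np' tag (by omega) h
    · rw [PySem.List.pyRange_one_eq_nil (by exact_mod_cast (by omega : cs.length ≤ j))]
      rfl

theorem pmb_inblock_some (cs : List Char) (k : Nat) :
    ∀ (j : Nat) (d : PySem.Dict String String) (l np : Int) (tag : String) (e : Nat),
      cs.length - j ≤ k → pmbScan cs j np = some e →
      (PySem.List.pyRange (j : Int) (cs.length : Int) 1).foldl (pmbStep cs) (d, l, true, np, tag)
        = (PySem.List.pyRange ((e : Int) + 1) (cs.length : Int) 1).foldl (pmbStep cs)
            (d.insert tag (String.ofList (PySem.List.slice cs (some l) (some (e : Int)))),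
              (e : Int) + 1, false, 0, tag) := by
  induction k with
  | zero =>
    intro j d l np tag e hk h
    rw [pmbScan] at h
    simp [show ¬ j < cs.length by omega] at h
  | succ k ih =>
    intro j d l np tag e hk h
    by_cases hj : j < cs.length
    · rw [pmbScan] at h
      simp only [dif_pos hj] at h
      rw [PySem.List.pyRange_one_cons (by exact_mod_cast hj), List.foldl_cons,
        pmbStep_inblock cs d l np tag j hj]
      set np' := if cs[j] = '{' then np + 1 else if cs[j] = '}' then np - 1 else np with hdep
      split at h
      next hz =>
        injection h with h
        subst h
        rw [if_pos hz, hz]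
      next hne =>
        rw [if_neg hne]
        have hc : ((j : Int) + 1) = (((j + 1 : Nat)) : Int) := by push_cast; ring
        rw [hc]
        exact ih (j + 1) d l np' tag e (by omega) h
    · rw [pmbScan] at h
      simp [hj] at h

theorem pmb_notblock_end (cs : List Char) (fuel l : Nat) (d : PySem.Dict String String)
    (hf : 1 ≤ fuel) (hl : l ≤ cs.length)
    (hno : ∀ j, l ≤ j → j < cs.length → cs[j]? ≠ some '{') :
    d.items = pmbLoop cs fuel d l := by
  match fuel, hf with
  | f + 1, _ =>
    rw [pmbLoop]
    simp only [pmbFind_none cs l hl hno, if_pos]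

theorem pmb_notblock (cs : List Char) (k : Nat) :
    ∀ (fuel i l : Nat) (d : PySem.Dict String String) (np : Int) (tag : String),
      cs.length - i ≤ k → l ≤ i → i ≤ cs.length → cs.length + 1 ≤ fuel + l →
      (∀ j, l ≤ j → j < i → cs[j]? ≠ some '{') →
      ((PySem.List.pyRange (i : Int) (cs.length : Int) 1).foldl (pmbStep cs)
        (d, (l : Int), false, np, tag)).1.items = pmbLoop cs fuel d l := by
  induction k with
  | zero =>
    intro fuel i l d np tag hk hli hin hf hno
    rw [PySem.List.pyRange_one_eq_nil (by exact_mod_cast (by omega : cs.length ≤ i))]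
    exact pmb_notblock_end cs fuel l d (by omega) (by omega) (fun j h1 h2 => hno j h1 (by omega))
  | succ k ih =>
    intro fuel i l d np tag hk hli hin hf hno
    by_cases hi : i < cs.length
    · rw [PySem.List.pyRange_one_cons (by exact_mod_cast hi), List.foldl_cons,
        pmbStep_notblock cs d (l : Int) np tag i hi]
      by_cases hc : cs[i] = '{'
      · rw [if_pos hc]
        have hfind := pmbFind_first cs l i hli hi hc hno
        match fuel, (by omega : 1 ≤ fuel) with
        | f + 1, _ =>
        rw [pmbLoop]
        simp only [hfind, Int.toNat_natCast]
        rw [if_neg (by omega)]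
        cases hscan : pmbScan cs (i + 1) 1 with
        | none =>
          have hc1 : ((i : Int) + 1) = (((i + 1 : Nat)) : Int) := by push_cast; ring
          rw [hc1, pmb_inblock_none cs cs.length (i + 1) d _ 1 _ (by omega) hscan]
        | some e =>
          have hscb := pmbScan_some_bounds cs cs.length (i + 1) 1 e (by omega) hscan
          have hc1 : ((i : Int) + 1) = (((i + 1 : Nat)) : Int) := by push_cast; ring
          rw [hc1, pmb_inblock_some cs cs.length (i + 1) d _ 1 _ e (by omega) hscan]
          have hc2 : ((e : Int) + 1) = (((e + 1 : Nat)) : Int) := by push_cast; ring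
          rw [hc2]
          exact ih f (e + 1) (e + 1) _ 0 _ (by omega) (by omega) (by omega) (by omega)
            (fun j h1 h2 => absurd (by omega : ¬ j < e + 1) (by omega))
      · rw [if_neg hc]
        have hno' : ∀ j, l ≤ j → j < i + 1 → cs[j]? ≠ some '{' := by
          intro j h1 h2
          rcases (by omega : j < i ∨ j = i) with h | h
          · exact hno j h1 h
          · subst h
            rw [List.getElem?_eq_getElem hi]
            simp [hc]
        have hc1 : ((i : Int) + 1) = (((i + 1 : Nat)) : Int) := by push_cast; ring
        rw [hc1]
        exact ih fuel (i + 1) l d np tag (by omega) (by omega) (by omega) (by omega) hno'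
    · rw [PySem.List.pyRange_one_eq_nil (by exact_mod_cast (by omega : cs.length ≤ i))]
      exact pmb_notblock_end cs fuel l d (by omega) (by omega) (fun j h1 h2 => hno j h1 (by omega))

-- ===== VERDICT (by name: the statement is the Claim_ definition above) =====
theorem parse_model_blocks_spec : Claim_equal_parse_model_blocks := by
  intro script _
  unfold Spec_parse_model_blocks parse_model_blocks parse_model_blocks_alt
  exact pmb_notblock script.toList script.toList.length (script.toList.length + 1) 0 0
    PySem.Dict.empty 0 "" (by omega) (by omega) (by omega) (by omega) (by omega)
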